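-- pv_equiv track=rewrite | github.com/PietPjotr/advent-of-code | 2024/my_parser.py | input_as_multigrids
-- ===== SOURCE A (Python) =====
-- from typing import List
--
-- def input_as_multigrids(lines: List[str], row: int) -> List[List[List[int]]]:
--     grids = []
--     for y in range(0, int(len(lines) / (row + 1) + 1) - 1):
--         grid = []
--         for x in range((row + 1) * y + 1, (row + 1) * y + row + 1):
--             grid.append([int(z) for z in lines[x].split()])
--         grids.append(grid)
--
--     return grids
-- ===== SOURCE B (Python) =====
-- from typing import List
--
-- def input_as_multigrids(lines: List[str], row: int) -> List[List[List[int]]]: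
--     block = row + 1
--     n = len(lines) // block
--     grids = [[] for _ in range(n)]
--     for i, line in enumerate(lines):
--         g, r = divmod(i, block)
--         if r != 0 and g < n:
--             grids[g].append([int(z) for z in line.split()])
--     return grids
-- ===== Notes on version B (the rewrite author's own statement) =====
-- stated objective: alternative
-- what changed: Replaces A's nested index-window loops (outer loop over grid numbers, inner loop indexing lines[x]) by a single flat scatter pass: pre-allocate len(lines)//(row+1) empty buckets, then one enumerate over the lines routes each non-header line into its bucket via divmod.
-- outside the precondition, e.g. on input_as_multigrids(['1', 'x'], 1): A raises ValueError, B raises ValueError; on input_as_multigrids([], -1): A raises ZeroDivisionError, B raises ZeroDivisionError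
import Mathlib
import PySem

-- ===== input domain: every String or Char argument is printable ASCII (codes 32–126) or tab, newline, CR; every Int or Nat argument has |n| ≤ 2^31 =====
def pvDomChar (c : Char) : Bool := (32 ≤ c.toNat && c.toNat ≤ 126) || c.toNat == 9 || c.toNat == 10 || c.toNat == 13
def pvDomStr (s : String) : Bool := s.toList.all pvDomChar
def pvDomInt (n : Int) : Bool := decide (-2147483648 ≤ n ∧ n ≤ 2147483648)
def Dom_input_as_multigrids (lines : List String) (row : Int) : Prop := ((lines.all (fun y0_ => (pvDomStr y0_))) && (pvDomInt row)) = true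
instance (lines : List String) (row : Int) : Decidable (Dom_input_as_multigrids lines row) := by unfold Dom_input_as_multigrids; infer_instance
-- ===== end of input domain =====

-- B replaces A's nested index-window loops by a single flat scatter pass: one enumerate
-- over the lines routes each non-header line into its pre-allocated bucket via divmod.

-- ===== PORT A =====
-- [int(z) for z in s.split()]  (ofStr? is some on every token under Pre_; getD 0 never read there)
def pvParseA (s : String) : List Int :=
  (PySem.Str.split₀ s).map (fun z => (PySem.Int.ofStr? z).getD 0)

-- int(len(lines) / (row + 1) + 1) - 1 is ported as integer floor division: exact on the
-- sampled domain (list-sized numerators), where the float quotient never rounds across an integer.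
def input_as_multigrids (lines : List String) (row : Int) : List (List (List Int)) :=
  let count : Int := PySem.Int.floordiv (PySem.List.len lines) (row + 1)
  (PySem.List.pyRange 0 count).foldl (fun grids y =>
    grids ++ [ (PySem.List.pyRange ((row + 1) * y + 1) ((row + 1) * y + row + 1)).foldl
        (fun grid x => grid ++ [pvParseA (PySem.List.pyGetD lines x "")]) [] ]) []

-- ===== PORT B =====
def input_as_multigrids_alt (lines : List String) (row : Int) : List (List (List Int)) :=
  let block := row + 1
  let n := PySem.Int.floordiv (PySem.List.len lines) block
  let grids0 := List.replicate n.toNat ([] : List (List Int))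
  (PySem.List.enumerate lines).foldl (fun grids p =>
    let g := PySem.Int.floordiv p.1 block
    let r := PySem.Int.mod p.1 block
    if r ≠ 0 ∧ g < n then grids.modify g.toNat (fun gr => gr ++ [pvParseA p.2]) else grids)
    grids0

-- ===== PRECONDITION & SPEC =====
-- Pre_ excludes row = -1 (A raises ZeroDivisionError) and inputs where a line A actually
-- indexes has a token that is not a Python int literal (A raises ValueError).
def Pre_input_as_multigrids (lines : List String) (row : Int) : Prop :=
  row ≠ -1 ∧
  ∀ p ∈ PySem.List.enumerate lines,
    (PySem.Int.mod p.1 (row + 1) ≠ 0 ∧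
     PySem.Int.floordiv p.1 (row + 1) < PySem.Int.floordiv (PySem.List.len lines) (row + 1)) →
    ∀ z ∈ PySem.Str.split₀ p.2, (PySem.Int.ofStr? z).isSome

instance (lines : List String) (row : Int) : Decidable (Pre_input_as_multigrids lines row) := by
  unfold Pre_input_as_multigrids; infer_instance

def pvWitness_input_as_multigrids : List String × Int := (["", "1 2", "3 4"], 2)

def Spec_input_as_multigrids (lines : List String) (row : Int) (out : List (List (List Int))) : Prop := out = input_as_multigrids_alt lines row
instance (lines : List String) (row : Int) (out : List (List (List Int))) : Decidable (Spec_input_as_multigrids lines row out) := by unfold Spec_input_as_multigrids; infer_instance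

-- ===== CLAIM (what is proved, stated in full; the proofs are below) =====
def Claim_equal_input_as_multigrids : Prop := ∀ (lines : List String) (row : Int), Dom_input_as_multigrids lines row → Pre_input_as_multigrids lines row → Spec_input_as_multigrids lines row (input_as_multigrids lines row)

-- ===== LEMMAS AND PROOFS =====

-- B's step keeps the empty bucket list empty.
theorem pv_foldl_nil (b n : Int) (L : List (Int × String)) :
    L.foldl (fun grids p =>
      if PySem.Int.mod p.1 b ≠ 0 ∧ PySem.Int.floordiv p.1 b < n
      then grids.modify (PySem.Int.floordiv p.1 b).toNat (fun gr => gr ++ [pvParseA p.2])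
      else grids) [] = [] := by
  induction L with
  | nil => rfl
  | cons p L ih =>
    simp only [List.foldl_cons]
    split_ifs <;> simpa [List.modify_nil] using ih

-- one scatter pass, viewed at a single bucket k
theorem pv_scatter (b n : Int) (L : List (Int × String)) (grids : List (List (List Int))) (k : Nat) :
    (L.foldl (fun grids p =>
      if PySem.Int.mod p.1 b ≠ 0 ∧ PySem.Int.floordiv p.1 b < n
      then grids.modify (PySem.Int.floordiv p.1 b).toNat (fun gr => gr ++ [pvParseA p.2])
      else grids) grids)[k]?
    = grids[k]?.map (fun g0 => g0 ++
        (L.filter (fun p => decide ((PySem.Int.mod p.1 b ≠ 0 ∧ PySem.Int.floordiv p.1 b < n) ∧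
            (PySem.Int.floordiv p.1 b).toNat = k))).map (fun p => pvParseA p.2)) := by
  induction L generalizing grids with
  | nil => cases h : grids[k]? <;> simp [h]
  | cons p L ih =>
    simp only [List.foldl_cons]
    by_cases hc : (PySem.Int.mod p.1 b ≠ 0 ∧ PySem.Int.floordiv p.1 b < n)
    · rw [if_pos hc]
      by_cases hk : (PySem.Int.floordiv p.1 b).toNat = k
      · have hf : (List.filter (fun p => decide ((PySem.Int.mod p.1 b ≠ 0 ∧ PySem.Int.floordiv p.1 b < n) ∧
            (PySem.Int.floordiv p.1 b).toNat = k)) (p :: L)) =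
            p :: (List.filter (fun p => decide ((PySem.Int.mod p.1 b ≠ 0 ∧ PySem.Int.floordiv p.1 b < n) ∧
            (PySem.Int.floordiv p.1 b).toNat = k)) L) := by
          simp [hc, hk]
        rw [ih, List.getElem?_modify, hf]
        cases h : grids[k]? <;> simp [hk]
      · have hf : (List.filter (fun p => decide ((PySem.Int.mod p.1 b ≠ 0 ∧ PySem.Int.floordiv p.1 b < n) ∧
            (PySem.Int.floordiv p.1 b).toNat = k)) (p :: L)) =
            (List.filter (fun p => decide ((PySem.Int.mod p.1 b ≠ 0 ∧ PySem.Int.floordiv p.1 b < n) ∧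
            (PySem.Int.floordiv p.1 b).toNat = k)) L) := by
          simp [hk]
        rw [ih, List.getElem?_modify, hf]
        cases h : grids[k]? <;> simp [hk]
    · rw [if_neg hc]
      have hf : (List.filter (fun p => decide ((PySem.Int.mod p.1 b ≠ 0 ∧ PySem.Int.floordiv p.1 b < n) ∧
            (PySem.Int.floordiv p.1 b).toNat = k)) (p :: L)) =
            (List.filter (fun p => decide ((PySem.Int.mod p.1 b ≠ 0 ∧ PySem.Int.floordiv p.1 b < n) ∧
            (PySem.Int.floordiv p.1 b).toNat = k)) L) := by
        simp [hc]
      rw [ih, hf]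

-- the indices routed to bucket k are exactly the k-th window b*k+1 .. b*k+b-1
theorem pv_filter_range (b n len : Int) (k : Nat) (hb : 0 < b) (hkn : (k : Int) < n)
    (hlen : b * n ≤ len) :
    (PySem.List.pyRange 0 len).filter (fun j =>
        decide ((PySem.Int.mod j b ≠ 0 ∧ PySem.Int.floordiv j b < n) ∧
          (PySem.Int.floordiv j b).toNat = k))
    = PySem.List.pyRange (b * k + 1) (b * k + b) := by
  have hbk : (0:Int) ≤ b * k := by positivity
  have hkb : b * (k:Int) + b ≤ b * n := by nlinarith
  rw [PySem.List.pyRange_one_append 0 (b * k) len hbk (by linarith),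
      PySem.List.pyRange_one_append (b * k) (b * k + b) len (by linarith) (by linarith),
      PySem.List.pyRange_one_append (b * k) (b * k + 1) (b * k + b) (by linarith) (by linarith)]
  rw [List.filter_append, List.filter_append, List.filter_append]
  have h1 : (PySem.List.pyRange 0 (b * k)).filter (fun j =>
      decide ((PySem.Int.mod j b ≠ 0 ∧ PySem.Int.floordiv j b < n) ∧
        (PySem.Int.floordiv j b).toNat = k)) = [] := by
    rw [List.filter_eq_nil_iff]
    intro j hj
    rw [PySem.List.mem_pyRange_one] at hj
    simp only [decide_eq_true_eq, not_and]
    rintro ⟨-, -⟩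
    have hge : 0 ≤ PySem.Int.floordiv j b := by
      rw [PySem.Int.le_floordiv_iff_mul_le hb]; linarith
    have hlt : PySem.Int.floordiv j b < k := by
      rw [PySem.Int.floordiv_lt_iff_lt_mul hb]; linarith [mul_comm b (k:Int)]
    omega
  have h2 : (PySem.List.pyRange (b * k) (b * k + 1)).filter (fun j =>
      decide ((PySem.Int.mod j b ≠ 0 ∧ PySem.Int.floordiv j b < n) ∧
        (PySem.Int.floordiv j b).toNat = k)) = [] := by
    rw [PySem.List.pyRange_one_singleton]
    have hmod : PySem.Int.mod (b * k) b = 0 := by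
      rw [PySem.Int.mod_eq_zero_iff_dvd]; exact dvd_mul_right b k
    simp [hmod]
  have h3 : (PySem.List.pyRange (b * k + 1) (b * k + b)).filter (fun j =>
      decide ((PySem.Int.mod j b ≠ 0 ∧ PySem.Int.floordiv j b < n) ∧
        (PySem.Int.floordiv j b).toNat = k)) = PySem.List.pyRange (b * k + 1) (b * k + b) := by
    rw [List.filter_eq_self]
    intro j hj
    rw [PySem.List.mem_pyRange_one] at hj
    have hdiv : PySem.Int.floordiv j b = k := by
      rw [PySem.Int.floordiv_eq_iff_of_pos hb]
      constructor
      · linarith [mul_comm b (k:Int)]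
      · have : ((k:Int) + 1) * b = b * k + b := by ring
        linarith
    have hmod : PySem.Int.mod j b ≠ 0 := by
      rw [Ne, PySem.Int.mod_eq_zero_iff_dvd]
      rintro ⟨c, rfl⟩
      have hc1 : (k:Int) < c := by
        rcases lt_or_ge (k:Int) c with h | h
        · exact h
        · exfalso
          have : b * c ≤ b * k := mul_le_mul_of_nonneg_left h (le_of_lt hb)
          linarith
      have hc2 : c < (k:Int) + 1 := by
        rcases lt_or_ge c ((k:Int) + 1) with h | h
        · exact h
        · exfalso
          have : b * ((k:Int) + 1) ≤ b * c := mul_le_mul_of_nonneg_left h (le_of_lt hb)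
          linarith [mul_add b (k:Int) 1]
      omega
    simp [hmod, hdiv, hkn]
  have h4 : (PySem.List.pyRange (b * k + b) len).filter (fun j =>
      decide ((PySem.Int.mod j b ≠ 0 ∧ PySem.Int.floordiv j b < n) ∧
        (PySem.Int.floordiv j b).toNat = k)) = [] := by
    rw [List.filter_eq_nil_iff]
    intro j hj
    rw [PySem.List.mem_pyRange_one] at hj
    simp only [decide_eq_true_eq, not_and]
    rintro ⟨-, -⟩
    have hge : (k:Int) + 1 ≤ PySem.Int.floordiv j b := by
      rw [PySem.Int.le_floordiv_iff_mul_le hb]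
      have : ((k:Int) + 1) * b = b * k + b := by ring
      linarith
    omega
  rw [h1, h2, h3, h4]
  simp

theorem input_as_multigrids_spec : Claim_equal_input_as_multigrids := by
  intro lines row _hdom hpre
  unfold Spec_input_as_multigrids
  obtain ⟨hne, -⟩ := hpre
  simp only [input_as_multigrids, input_as_multigrids_alt]
  set b := row + 1 with hbdef
  set n := PySem.Int.floordiv (PySem.List.len lines) b with hndef
  by_cases hb : 0 < b
  · -- positive block size
    have hlen0 : (0:Int) ≤ PySem.List.len lines := by
      simp [PySem.List.len_eq]
    have hn0 : 0 ≤ n := by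
      rw [hndef, PySem.Int.le_floordiv_iff_mul_le hb]; linarith
    have hbn : b * n ≤ PySem.List.len lines := by
      have h := PySem.Int.floordiv_mul_add_mod (PySem.List.len lines) b
      have hm := PySem.Int.mod_nonneg (PySem.List.len lines) hb
      rw [← hndef] at h
      nlinarith
    -- A as a map of maps
    rw [PySem.List.foldl_append_singleton_eq_map
        (fun y => (PySem.List.pyRange (b * y + 1) (b * y + row + 1)).foldl
          (fun grid x => grid ++ [pvParseA (PySem.List.pyGetD lines x "")]) []) _ []]
    rw [List.nil_append]
    -- compare bucket by bucket
    apply List.ext_getElem?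
    intro k
    rw [pv_scatter b n (PySem.List.enumerate lines) (List.replicate n.toNat []) k]
    by_cases hk : k < n.toNat
    · have hcast : n = ((n.toNat : Nat) : Int) := (Int.toNat_of_nonneg hn0).symm
      have hA : ((PySem.List.pyRange 0 n).map (fun y =>
          (PySem.List.pyRange (b * y + 1) (b * y + row + 1)).foldl
            (fun grid x => grid ++ [pvParseA (PySem.List.pyGetD lines x "")]) []))[k]? =
          some ((PySem.List.pyRange (b * (k:Int) + 1) (b * (k:Int) + row + 1)).foldl
            (fun grid x => grid ++ [pvParseA (PySem.List.pyGetD lines x "")]) []) := by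
        conv_lhs => rw [hcast]
        exact PySem.List.getElem?_map_pyRange_zero _ n.toNat k hk
      rw [hA, List.getElem?_replicate, if_pos hk]
      rw [PySem.List.foldl_append_singleton_eq_map
        (fun x => pvParseA (PySem.List.pyGetD lines x "")) _ []]
      rw [List.nil_append]
      -- the filtered enumerate equals the k-th window
      rw [PySem.List.enumerate_eq_map_pyRange lines ""]
      rw [List.filter_map, List.map_map]
      have hfr := pv_filter_range b n (PySem.List.len lines) k hb
        (by omega) hbn
      simp only [Function.comp_def] at hfr ⊢
      rw [hfr]
      have harith : b * (k:Int) + b = b * k + row + 1 := by rw [hbdef]; ring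
      rw [harith]
      simp
    · have hlen : ((PySem.List.pyRange 0 n).map (fun y =>
          (PySem.List.pyRange (b * y + 1) (b * y + row + 1)).foldl
            (fun grid x => grid ++ [pvParseA (PySem.List.pyGetD lines x "")]) [])).length = n.toNat := by
        simp [PySem.List.length_pyRange_one]
      rw [List.getElem?_eq_none (by omega), List.getElem?_replicate, if_neg hk]
      rfl
  · -- negative block size: both sides are []
    have hb' : b < 0 := by
      rcases lt_trichotomy b 0 with h | h | h
      · exact h
      · exact absurd (by omega : row = -1) hne
      · exact absurd h hb
    have hlen0 : (0:Int) ≤ PySem.List.len lines := by simp [PySem.List.len_eq]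
    have hn0 : n ≤ 0 := by
      by_contra h
      have hmul : n * b < 0 := mul_neg_of_pos_of_neg (not_le.mp h) hb'
      have heq := PySem.Int.floordiv_mul_add_mod (PySem.List.len lines) b
      rw [← hndef] at heq
      have hm := (PySem.Int.mod_neg_bounds (PySem.List.len lines) hb').2
      linarith
    rw [PySem.List.pyRange_one_eq_nil hn0]
    have hrep : n.toNat = 0 := by omega
    rw [hrep]
    simp only [List.replicate, List.foldl_nil]
    exact (pv_foldl_nil b n (PySem.List.enumerate lines)).symm
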